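-- pv_equiv track=rewrite | github.com/ChoYeonJun/Algorithms | Programmers/모의고사/main.py | solution
-- ===== SOURCE A (Python) =====
-- def solution(answers):
--     loops = []
--     loop1 = [1, 2, 3, 4, 5]
--     loop2 = [2, 1, 2, 3, 2, 4, 2, 5]
--     loop3 = [3, 3, 1, 1, 2, 2, 4, 4, 5, 5]
--     loops.append(loop1)
--     loops.append(loop2)
--     loops.append(loop3)
--     result = 0
--     answer = []
--     for loop in loops:
--         mul_value = len(answers) // len(loop)
--         mod_value = len(answers) % len(loop)
--
--         submit = []
--
--         for value in range(mul_value):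
--             submit.extend( loop)
--
--         submit.extend(loop[:mod_value])
--         count = 0
--         for i in range(len(answers)):
--             if submit[i] == answers[i]:
--                 count += 1
--
--         if count > result:
--             result = count
--             answer.clear()
--             answer.append(loops.index(loop)+1)
--         elif count == result:
--             answer.append(loops.index(loop)+1)
--     return answer
-- ===== SOURCE B (Python) =====
-- def solution(answers):
--     p1 = [1, 2, 3, 4, 5]
--     p2 = [2, 1, 2, 3, 2, 4, 2, 5]
--     p3 = [3, 3, 1, 1, 2, 2, 4, 4, 5, 5]
--     c1 = c2 = c3 = 0
--     for i, a in enumerate(answers):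
--         if p1[i % 5] == a:
--             c1 += 1
--         if p2[i % 8] == a:
--             c2 += 1
--         if p3[i % 10] == a:
--             c3 += 1
--     m = max(c1, c2, c3)
--     return [p for p, c in ((1, c1), (2, c2), (3, c3)) if c == m]
-- ===== Notes on version B (the rewrite author's own statement) =====
-- stated objective: simpler
-- what changed: B replaces A's per-pattern materialisation of a full-length submit list (repeat-and-slice then index-compare) by a single pass over answers using modulo indexing into the three fixed patterns, and replaces the running best/clear/append selection loop by max-and-filter.
import Mathlib
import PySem

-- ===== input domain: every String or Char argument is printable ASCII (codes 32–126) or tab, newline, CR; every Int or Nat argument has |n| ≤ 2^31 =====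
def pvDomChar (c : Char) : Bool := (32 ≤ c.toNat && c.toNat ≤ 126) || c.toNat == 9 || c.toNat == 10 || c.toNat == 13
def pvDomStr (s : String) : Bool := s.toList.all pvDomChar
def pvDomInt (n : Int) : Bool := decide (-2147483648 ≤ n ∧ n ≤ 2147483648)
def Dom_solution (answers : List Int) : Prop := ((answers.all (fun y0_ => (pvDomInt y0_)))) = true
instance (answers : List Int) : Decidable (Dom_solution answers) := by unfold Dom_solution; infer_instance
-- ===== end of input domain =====

-- ===== PORT A =====
-- B replaces A's per-pattern repeat-and-slice submit list + running best/clear/append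
-- selection by one modulo-indexed pass over answers and a max-and-filter selection (simpler).
def pvLoop1 : List Int := [1, 2, 3, 4, 5]
def pvLoop2 : List Int := [2, 1, 2, 3, 2, 4, 2, 5]
def pvLoop3 : List Int := [3, 3, 1, 1, 2, 2, 4, 4, 5, 5]

-- one iteration of A's `for loop in loops` body; submit[i] is always in range
-- (len(submit) = len(answers)), so pyGetD's default is never read
def pvStepA (answers : List Int) (loops : List (List Int)) (st : Int × List Int)
    (loop : List Int) : Int × List Int :=
  let mulValue := PySem.Int.floordiv (answers.length : Int) (loop.length : Int)
  let modValue := PySem.Int.mod (answers.length : Int) (loop.length : Int)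
  let submit := ((PySem.List.pyRange 0 mulValue).foldl (fun s _ => s ++ loop) []) ++
    PySem.List.slice loop none (some modValue)
  let count := (PySem.List.pyRange 0 (answers.length : Int)).foldl
    (fun c i => if PySem.List.pyGetD submit i 0 == PySem.List.pyGetD answers i 0 then c + 1 else c)
    (0 : Int)
  if count > st.1 then
    (count, [(((PySem.List.index? loops loop).getD 0 : Nat) : Int) + 1])
  else if count = st.1 then
    (st.1, st.2 ++ [(((PySem.List.index? loops loop).getD 0 : Nat) : Int) + 1])
  else st

def solution (answers : List Int) : List Int :=
  ([pvLoop1, pvLoop2, pvLoop3].foldl (pvStepA answers [pvLoop1, pvLoop2, pvLoop3]) (0, [])).2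

-- ===== PORT B =====
def pvB1 : List Int := [1, 2, 3, 4, 5]
def pvB2 : List Int := [2, 1, 2, 3, 2, 4, 2, 5]
def pvB3 : List Int := [3, 3, 1, 1, 2, 2, 4, 4, 5, 5]

def solution_alt (answers : List Int) : List Int :=
  let cs := (PySem.List.enumerate answers).foldl
    (fun (c : Int × Int × Int) e =>
      ( if PySem.List.pyGetD pvB1 (PySem.Int.mod e.1 5) 0 == e.2 then c.1 + 1 else c.1,
        if PySem.List.pyGetD pvB2 (PySem.Int.mod e.1 8) 0 == e.2 then c.2.1 + 1 else c.2.1,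
        if PySem.List.pyGetD pvB3 (PySem.Int.mod e.1 10) 0 == e.2 then c.2.2 + 1 else c.2.2))
    (0, 0, 0)
  let m := max cs.1 (max cs.2.1 cs.2.2)
  (if cs.1 == m then [(1 : Int)] else []) ++ (if cs.2.1 == m then [2] else []) ++
    (if cs.2.2 == m then [3] else [])

-- ===== PRECONDITION & SPEC =====
def Spec_solution (answers : List Int) (out : List Int) : Prop := out = solution_alt answers
instance (answers : List Int) (out : List Int) : Decidable (Spec_solution answers out) := by unfold Spec_solution; infer_instance

-- ===== CLAIM (what is proved, stated in full; the proofs are below) =====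
def Claim_equal_solution : Prop := ∀ (answers : List Int), Dom_solution answers → Spec_solution answers (solution answers)

-- ===== LEMMAS AND PROOFS =====

-- the common count: matches of pattern p against answers under cyclic (modulo) indexing
def pvCnt (p : List Int) (ans : List Int) : Int :=
  ((List.range ans.length).countP
    (fun k => p.getD (k % p.length) 0 == ans.getD k 0) : Nat)

lemma pvCnt_nonneg (p ans : List Int) : 0 ≤ pvCnt p ans := by
  unfold pvCnt; exact Int.natCast_nonneg _

-- A's repeated-extend loop builds the flattened replicate
lemma pv_foldl_extend {α : Type} (p : List α) :
    ∀ (l : List Int) (acc : List α),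
      l.foldl (fun s _ => s ++ p) acc = acc ++ (List.replicate l.length p).flatten := by
  intro l
  induction l with
  | nil => intro acc; simp
  | cons x t ih => intro acc; simp [List.foldl_cons, ih, List.replicate_succ, List.append_assoc]

lemma pv_getD_cycle (p : List Int) :
    ∀ (q k r : Nat), r ≤ p.length → k < q * p.length + r →
      ((List.replicate q p).flatten ++ p.take r).getD k 0 = p.getD (k % p.length) 0 := by
  intro q
  induction q with
  | zero =>
    intro k r hr hk
    have hkr : k < r := by omega
    have hk' : k < p.length := by omega
    rw [Nat.mod_eq_of_lt hk']
    simp only [List.replicate, List.flatten_nil, List.nil_append]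
    simp [List.getD, hkr, hk']
  | succ q ih =>
    intro k r hr hk
    rw [List.replicate_succ, List.flatten_cons, List.append_assoc]
    by_cases hkp : k < p.length
    · rw [Nat.mod_eq_of_lt hkp]
      simp [List.getD, List.getElem?_append, hkp]
    · rw [Nat.not_lt] at hkp
      have hkp' : ¬ k < p.length := by omega
      have h1 : ((p ++ ((List.replicate q p).flatten ++ p.take r)).getD k 0)
          = (((List.replicate q p).flatten ++ p.take r).getD (k - p.length) 0) := by
        simp [List.getD, List.getElem?_append, hkp']
      have hmul : (q + 1) * p.length = q * p.length + p.length := by ring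
      rw [h1, ih (k - p.length) r hr (by omega)]
      congr 1
      have hk2 : k - p.length + p.length = k := by omega
      calc (k - p.length) % p.length = (k - p.length + p.length) % p.length :=
            (Nat.add_mod_right _ _).symm
        _ = k % p.length := by rw [hk2]

lemma pv_countP_enumerate {α : Type} (q : Int × α → Bool) (d : α) :
    ∀ (l : List α) (s : Nat),
      (PySem.List.enumerate l (s : Int)).countP q
        = (List.range l.length).countP (fun k => q ((s + k : Nat), l.getD k d)) := by
  intro l
  induction l with
  | nil => intro s; simp [PySem.List.enumerate]
  | cons a t ih =>
    intro s
    have h1 : ((s : Int) + 1) = ((s + 1 : Nat) : Int) := by push_cast; ring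
    simp only [PySem.List.enumerate, List.countP_cons, h1]
    rw [ih (s + 1)]
    simp only [List.length_cons, List.range_succ_eq_map, List.countP_cons, List.countP_map]
    have h2 : ∀ k : Nat, ((s + 1 + k : Nat) : Int) = ((s + (k + 1) : Nat) : Int) := by
      intro k; push_cast; ring
    simp only [Function.comp_def, h2]
    simp [List.getD]

lemma pv_foldl_triple (q1 q2 q3 : Int × Int → Bool) :
    ∀ (l : List (Int × Int)) (x y z : Int),
      l.foldl
        (fun (c : Int × Int × Int) e =>
          ( if q1 e then c.1 + 1 else c.1,
            if q2 e then c.2.1 + 1 else c.2.1,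
            if q3 e then c.2.2 + 1 else c.2.2))
        (x, y, z)
      = (x + (l.countP q1 : Nat), y + (l.countP q2 : Nat), z + (l.countP q3 : Nat)) := by
  intro l
  induction l with
  | nil => intro x y z; simp
  | cons e t ih =>
    intro x y z
    simp only [List.foldl_cons, List.countP_cons]
    split_ifs <;> simp [ih] <;> omega

lemma pv_countA (p ans : List Int) (hp : 0 < p.length) :
    (PySem.List.pyRange 0 (ans.length : Int)).foldl
      (fun c i =>
        if PySem.List.pyGetD
            (((PySem.List.pyRange 0 (PySem.Int.floordiv (ans.length : Int) (p.length : Int))).foldl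
                (fun s _ => s ++ p) []) ++
              PySem.List.slice p none (some (PySem.Int.mod (ans.length : Int) (p.length : Int))))
            i 0 == PySem.List.pyGetD ans i 0
        then c + 1 else c)
      (0 : Int) = pvCnt p ans := by
  simp only [PySem.Int.floordiv_natCast, PySem.Int.mod_natCast]
  rw [PySem.List.slice_to p (Int.natCast_nonneg _), pv_foldl_extend p, List.nil_append]
  simp only [PySem.List.pyRange_zero_natCast, List.length_map, List.length_range,
    Int.toNat_natCast]
  rw [List.foldl_map, PySem.List.foldl_count_if, zero_add]
  unfold pvCnt
  congr 1
  apply List.countP_congr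
  intro k hk
  have hkn : k < ans.length := List.mem_range.mp hk
  have hcomm : ans.length / p.length * p.length = p.length * (ans.length / p.length) :=
    Nat.mul_comm _ _
  rw [PySem.List.pyGetD_natCast, PySem.List.pyGetD_natCast,
    pv_getD_cycle p (ans.length / p.length) k (ans.length % p.length)
      (le_of_lt (Nat.mod_lt _ hp))
      (by have := Nat.div_add_mod ans.length p.length; omega)]

set_option maxRecDepth 4096 in
lemma pv_cntB (ans : List Int) :
    (PySem.List.enumerate ans 0).foldl
      (fun (c : Int × Int × Int) e =>
        ( if PySem.List.pyGetD pvB1 (PySem.Int.mod e.1 5) 0 == e.2 then c.1 + 1 else c.1,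
          if PySem.List.pyGetD pvB2 (PySem.Int.mod e.1 8) 0 == e.2 then c.2.1 + 1 else c.2.1,
          if PySem.List.pyGetD pvB3 (PySem.Int.mod e.1 10) 0 == e.2 then c.2.2 + 1 else c.2.2))
      (0, 0, 0)
    = (pvCnt pvB1 ans, pvCnt pvB2 ans, pvCnt pvB3 ans) := by
  have h0 : (0 : Int) = ((0 : Nat) : Int) := by norm_num
  rw [pv_foldl_triple, h0, pv_countP_enumerate _ (0 : Int), pv_countP_enumerate _ (0 : Int),
    pv_countP_enumerate _ (0 : Int)]
  unfold pvCnt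
  refine Prod.ext ?_ (Prod.ext ?_ ?_) <;>
  · simp only [Nat.cast_zero, zero_add]
    congr 1
    apply List.countP_congr
    intro k _
    have e5 : PySem.Int.mod ((k : Nat) : Int) 5 = ((k % 5 : Nat) : Int) := by
      simpa using PySem.Int.mod_natCast k 5
    have e8 : PySem.Int.mod ((k : Nat) : Int) 8 = ((k % 8 : Nat) : Int) := by
      simpa using PySem.Int.mod_natCast k 8
    have e10 : PySem.Int.mod ((k : Nat) : Int) 10 = ((k % 10 : Nat) : Int) := by
      simpa using PySem.Int.mod_natCast k 10
    simp only [Nat.zero_add, e5, e8, e10, PySem.List.pyGetD_natCast, Nat.cast_zero,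
      show pvB1.length = 5 from rfl, show pvB2.length = 8 from rfl,
      show pvB3.length = 10 from rfl]

-- one iteration of A's selection loop, abstracted over the count
lemma pv_stepA_eq (ans : List Int) (loops : List (List Int)) (st : Int × List Int)
    (loop : List Int) (hp : 0 < loop.length) :
    pvStepA ans loops st loop =
      (if pvCnt loop ans > st.1 then
        (pvCnt loop ans, [(((PySem.List.index? loops loop).getD 0 : Nat) : Int) + 1])
      else if pvCnt loop ans = st.1 then
        (st.1, st.2 ++ [(((PySem.List.index? loops loop).getD 0 : Nat) : Int) + 1])
      else st) := by
  simp only [pvStepA]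
  rw [pv_countA loop ans hp]

-- ===== VERDICT (by name: the statement is the Claim_ definition above) =====
theorem solution_spec : Claim_equal_solution := by
  unfold Claim_equal_solution Spec_solution
  intro ans _
  have i1 : (((PySem.List.index? [pvLoop1, pvLoop2, pvLoop3] pvLoop1).getD 0 : Nat) : Int) = 0 := by decide
  have i2 : (((PySem.List.index? [pvLoop1, pvLoop2, pvLoop3] pvLoop2).getD 0 : Nat) : Int) = 1 := by decide
  have i3 : (((PySem.List.index? [pvLoop1, pvLoop2, pvLoop3] pvLoop3).getD 0 : Nat) : Int) = 2 := by decide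
  unfold solution
  rw [List.foldl_cons, List.foldl_cons, List.foldl_cons, List.foldl_nil,
    pv_stepA_eq ans _ _ _ (by decide), pv_stepA_eq ans _ _ _ (by decide),
    pv_stepA_eq ans _ _ _ (by decide), i1, i2, i3]
  unfold solution_alt
  rw [pv_cntB, show pvB1 = pvLoop1 from rfl, show pvB2 = pvLoop2 from rfl,
    show pvB3 = pvLoop3 from rfl]
  have h1 := pvCnt_nonneg pvLoop1 ans
  have h2 := pvCnt_nonneg pvLoop2 ans
  have h3 := pvCnt_nonneg pvLoop3 ans
  generalize hg1 : pvCnt pvLoop1 ans = c1 at h1 ⊢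
  generalize hg2 : pvCnt pvLoop2 ans = c2 at h2 ⊢
  generalize hg3 : pvCnt pvLoop3 ans = c3 at h3 ⊢
  clear hg1 hg2 hg3 i1 i2 i3
  simp only [beq_iff_eq]
  norm_num
  split_ifs <;> first | rfl | omega
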